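-- pv_equiv track=rewrite | github.com/Surya18-C/python_assignment | src/Assignment10/utill.py | cnt
-- ===== SOURCE A (Python) =====
-- def cnt(n):
--     val = []
--
--     count = {}
--
--     for i in n:
--         if i in count:
--             count[i] += 1
--         else:
--             count[i] = 1
--
--     counts=[]
--     for k, v in count.items():
--          counts.append(v)
--
--     return counts
-- ===== SOURCE B (Python) =====
-- def cnt(n):
--     rest = list(n)
--     out = []
--     while rest:
--         x = rest[0]
--         remaining = [y for y in rest if y != x]
--         out.append(len(rest) - len(remaining))
--         rest = remaining
--     return out
-- ===== Notes on version B (the rewrite author's own statement) =====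
-- stated objective: alternative
-- what changed: Replaces the dict counter with a partition loop: repeatedly take the first remaining element, filter out all its occurrences, and record the count as the drop in length; no dictionary or per-element lookup is kept.
import Mathlib
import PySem

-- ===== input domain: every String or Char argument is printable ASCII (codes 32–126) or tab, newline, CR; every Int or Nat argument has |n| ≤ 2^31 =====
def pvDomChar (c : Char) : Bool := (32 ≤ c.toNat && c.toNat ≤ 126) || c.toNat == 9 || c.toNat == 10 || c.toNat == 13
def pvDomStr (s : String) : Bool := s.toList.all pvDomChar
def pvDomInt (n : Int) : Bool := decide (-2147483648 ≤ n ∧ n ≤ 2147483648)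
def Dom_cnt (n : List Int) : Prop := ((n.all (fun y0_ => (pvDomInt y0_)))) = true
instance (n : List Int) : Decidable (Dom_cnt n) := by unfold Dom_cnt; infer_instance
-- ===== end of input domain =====

-- B replaces A's dict counter by a partition loop (take first element, filter out its
-- occurrences, record the length drop) — an alternative algorithm, same results.

-- ===== PORT A =====
def cnt (n : List Int) : List Int :=
  let count : PySem.Dict Int Int :=
    n.foldl (fun d i =>
      if d.contains i then d.insert i (d.getD i 0 + 1) else d.insert i 1)
      PySem.Dict.empty
  count.items.foldl (fun counts kv => counts ++ [kv.2]) []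

-- ===== PORT B =====
-- B's while-loop over the shrinking 'rest' list, as structural recursion on its length.
def cnt_alt (rest : List Int) : List Int :=
  match rest with
  | [] => []
  | x :: xs =>
    let remaining := (x :: xs).filter (fun y => y != x)
    ((((x :: xs).length : Int)) - (remaining.length : Int)) :: cnt_alt remaining
termination_by rest.length
decreasing_by
  simp only [List.filter_cons, bne_self_eq_false, List.length_cons]
  exact Nat.lt_succ_of_le (List.length_filter_le _ _)

-- ===== PRECONDITION & SPEC =====
def Spec_cnt (n : List Int) (out : List Int) : Prop := out = cnt_alt n
instance (n : List Int) (out : List Int) : Decidable (Spec_cnt n out) := by unfold Spec_cnt; infer_instance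

-- ===== CLAIM =====
def Claim_equal_cnt : Prop := ∀ (n : List Int), Dom_cnt n → Spec_cnt n (cnt n)

-- ===== LEMMAS AND PROOFS =====

-- A's counting loop is exactly the Counter fold: when the key is absent, getD gives 0.
theorem cnt_fold_eq_counter (n : List Int) :
    n.foldl (fun d i =>
      if d.contains i then d.insert i (d.getD i 0 + 1) else d.insert i 1)
      PySem.Dict.empty = PySem.Dict.counter n := by
  rw [← PySem.Dict.foldl_insert_getD_add_one_eq_counter]
  congr 1
  funext d i
  by_cases h : d.contains i = true
  · simp [h]
  · simp only [Bool.not_eq_true] at h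
    simp [h, PySem.Dict.getD_of_not_contains (h := h)]

-- folding Set.add over a list keeps the accumulator's members absorbed
theorem foldl_add_filter (x : Int) :
    ∀ (xs : List Int) (acc : PySem.Set Int), acc.contains x = true →
      xs.foldl PySem.Set.add acc = (xs.filter (fun y => y != x)).foldl PySem.Set.add acc := by
  intro xs
  induction xs with
  | nil => intro acc _; rfl
  | cons y ys ih =>
    intro acc hacc
    by_cases hyx : (y != x) = true
    · simp only [List.filter_cons, hyx, List.foldl_cons]
      apply ih
      have hx : x ∈ acc := by simpa [PySem.Set.contains] using hacc
      unfold PySem.Set.add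
      split
      · exact hacc
      · simp [PySem.Set.contains, hx]
    · have hy : y = x := by simpa using hyx
      subst hy
      simp only [List.filter_cons, bne_self_eq_false, List.foldl_cons]
      have hy' : y ∈ acc := by simpa [PySem.Set.contains] using hacc
      have : PySem.Set.add acc y = acc := by
        unfold PySem.Set.add; simp [PySem.Set.contains, hy']
      rw [this]
      exact ih acc hacc

-- a prepended element not occurring in the list stays in front of the fold
theorem foldl_add_cons (x : Int) :
    ∀ (xs : List Int) (s : PySem.Set Int), (∀ y ∈ xs, y ≠ x) →
      xs.foldl PySem.Set.add (x :: s) = x :: xs.foldl PySem.Set.add s := by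
  intro xs
  induction xs with
  | nil => intro s _; rfl
  | cons y ys ih =>
    intro s h
    have hyx : y ≠ x := h y (by simp)
    simp only [List.foldl_cons]
    have hne : (y == x) = false := by simpa using hyx
    have : PySem.Set.add (x :: s) y = x :: PySem.Set.add s y := by
      by_cases hm : y ∈ s
      · simp [PySem.Set.add, PySem.Set.contains, hm]
      · simp [PySem.Set.add, PySem.Set.contains, hm, hyx]
    rw [this]
    exact ih _ (fun z hz => h z (by simp [hz]))

-- first-occurrence dedup recursion: ofList (x::xs) = x :: ofList (xs with x removed)
theorem ofList_cons_filter (x : Int) (xs : List Int) :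
    PySem.Set.ofList (x :: xs) = x :: PySem.Set.ofList (xs.filter (fun y => y != x)) := by
  rw [PySem.Set.ofList_eq_foldl, PySem.Set.ofList_eq_foldl]
  simp only [List.foldl_cons]
  have h1 : PySem.Set.add [] x = [x] := by rfl
  rw [h1]
  rw [foldl_add_filter x xs [x] (by simp [PySem.Set.contains])]
  exact foldl_add_cons x _ [] (by intro y hy; simpa using (List.of_mem_filter hy))

theorem cntAlt_eq_map (n : List Int) :
    cnt_alt n = (PySem.Set.ofList n).map (fun x => ((n.count x : Int))) := by
  induction n using cnt_alt.induct with
  | case1 => simp [cnt_alt]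
  | case2 x xs remaining ih =>
    rw [cnt_alt, ofList_cons_filter]
    simp only [List.map_cons]
    have hrem : remaining = xs.filter (fun y => y != x) := by
      simp [remaining]
    have hfc : List.filter (fun y => y != x) (x :: xs) = xs.filter (fun y => y != x) := by
      simp
    congr 1
    · -- head: length drop = count of x in x::xs
      have h1 := List.length_eq_countP_add_countP (l := xs) (p := fun y => y != x)
      have h2 : (xs.filter (fun y => y != x)).length = xs.countP (fun y => y != x) := by
        rw [← List.countP_eq_length_filter]
      have hc : xs.count x = xs.countP (fun a => decide (¬ ((a != x) = true))) := by
        rw [List.count]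
        apply List.countP_congr
        intro a _
        by_cases h : a = x <;> simp [h]
      have hlen : xs.length = (xs.filter (fun y => y != x)).length + xs.count x := by
        rw [h2, hc]
        exact h1
      rw [hfc]
      simp only [List.count_cons_self, List.length_cons]
      push_cast [hlen]
      ring
    · -- tail: counts of the remaining elements are unchanged by the filter
      rw [ih, hrem]
      apply List.map_congr_left
      intro y hy
      have hyr : y ∈ xs.filter (fun y => y != x) := by
        rw [← PySem.List.dedup_eq_ofList] at hy
        exact (PySem.List.mem_dedup _ _).mp hy
      have hyx : (y != x) = true := (List.mem_filter.mp hyr).2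
      have hyx' : y ≠ x := by simpa using hyx
      have hcount1 : List.count y (x :: xs) = List.count y xs := by
        simp [List.count_cons]
        exact fun h => hyx' h.symm
      have hcount2 : List.count y (List.filter (fun y => y != x) xs) = List.count y xs := by
        rw [List.count_filter]
        simpa using hyx
      rw [hcount1, hcount2]

theorem cnt_spec' (n : List Int) : cnt n = cnt_alt n := by
  unfold cnt
  rw [cnt_fold_eq_counter, PySem.List.foldl_append_singleton_eq_map,
    PySem.Dict.items_counter, List.map_map, cntAlt_eq_map]
  rfl

-- ===== VERDICT =====
theorem cnt_spec : Claim_equal_cnt := by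
  intro n _
  exact cnt_spec' n
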